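-- pv_equiv track=rewrite | github.com/wakawaka121/Spring---2020 | Short PA 3/list_of_strings.py | add_top_bottom_element
-- ===== SOURCE A (Python) =====
-- def add_top_bottom_element(width, j):
--     """
--     This function takes two parameters to
--     generate the top and bottom string
--     width: and int value that corresponds to length
--     of string
--     j: is an int value to determine top or bottom
--     """
--     strings = ""
--     if j == 0:
--         for i in range(width):
--             if i == 0:
--                 strings += " "
--             elif i < width-1:
--                 strings += "T"
--             elif i == (width -1):
--                 strings += " "
--     else:
--         for i in range(width):
--             if i == 0:
--                 strings += " "
--             elif i < width-1:
--                 strings += "B"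
--             elif i == (width-1):
--                 strings += " "
--     return strings
-- ===== SOURCE B (Python) =====
-- def add_top_bottom_element(width, j):
--     """Closed-form border string: a space, width-2 repeated letters, a space."""
--     char = "T" if j == 0 else "B"
--     if width <= 0:
--         return ""
--     if width == 1:
--         return " "
--     return " " + char * (width - 2) + " "
-- ===== Notes on version B (the rewrite author's own statement) =====
-- stated objective: simpler
-- what changed: Replaced the character-by-character indexed loop with per-index branches by a closed-form construction ' ' + char*(width-2) + ' ' (guards for width <= 0 and width == 1); string repetition is a single C-level operation instead of width Python iterations.
import Mathlib
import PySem

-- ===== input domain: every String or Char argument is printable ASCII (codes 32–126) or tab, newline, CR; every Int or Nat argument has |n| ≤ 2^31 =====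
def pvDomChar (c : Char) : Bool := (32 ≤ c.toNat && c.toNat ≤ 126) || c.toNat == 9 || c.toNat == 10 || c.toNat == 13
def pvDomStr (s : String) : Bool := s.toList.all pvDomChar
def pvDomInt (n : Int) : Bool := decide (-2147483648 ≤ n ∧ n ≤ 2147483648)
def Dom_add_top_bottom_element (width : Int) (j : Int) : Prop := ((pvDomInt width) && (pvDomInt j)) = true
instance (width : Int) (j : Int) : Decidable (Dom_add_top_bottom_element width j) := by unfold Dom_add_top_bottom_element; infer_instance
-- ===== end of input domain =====

-- B replaces A's character-by-character loop by a closed-form construction (simpler); same return value everywhere.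

-- ===== PORT A =====
-- A's loop body, appending to the accumulated characters (strings += c on List Char)
def pvStepA (width : Int) (c : Char) (s : List Char) (i : Int) : List Char :=
  if i == 0 then s ++ [' ']
  else if i < width - 1 then s ++ [c]
  else if i == width - 1 then s ++ [' ']
  else s

def add_top_bottom_element (width : Int) (j : Int) : String :=
  if j == 0 then
    String.mk ((PySem.List.pyRange 0 width 1).foldl (pvStepA width 'T') [])
  else
    String.mk ((PySem.List.pyRange 0 width 1).foldl (pvStepA width 'B') [])

-- ===== PORT B =====
def add_top_bottom_element_alt (width : Int) (j : Int) : String :=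
  let ch : Char := if j == 0 then 'T' else 'B'
  if width ≤ 0 then ""
  else if width = 1 then " "
  else String.mk (' ' :: (List.replicate (width - 2).toNat ch ++ [' ']))

-- ===== PRECONDITION & SPEC =====
def Spec_add_top_bottom_element (width : Int) (j : Int) (out : String) : Prop := out = add_top_bottom_element_alt width j
instance (width : Int) (j : Int) (out : String) : Decidable (Spec_add_top_bottom_element width j out) := by unfold Spec_add_top_bottom_element; infer_instance

-- ===== CLAIM (what is proved, stated in full; the proofs are below) =====
def Claim_equal_add_top_bottom_element : Prop := ∀ (width : Int) (j : Int), Dom_add_top_bottom_element width j → Spec_add_top_bottom_element width j (add_top_bottom_element width j)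

-- ===== LEMMAS AND PROOFS =====

-- partial-loop invariant: after the first k iterations (1 ≤ k ≤ width-1) the buffer is
-- a space followed by k-1 copies of the letter
lemma pvLoopA_partial (width : Int) (c : Char) (k : Nat) (hk : 1 ≤ k)
    (hW : (k : Int) ≤ width - 1) :
    (PySem.List.pyRange 0 (k : Int) 1).foldl (pvStepA width c) [] =
      ' ' :: List.replicate (k - 1) c := by
  induction k with
  | zero => omega
  | succ n ih =>
    by_cases hn : n = 0
    · subst hn
      have h01 : PySem.List.pyRange 0 ((1:Nat) : Int) 1 = [0] := by decide
      rw [h01]; simp [pvStepA]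
    · have h1 : 1 ≤ n := by omega
      have h2 : (n : Int) ≤ width - 1 := by push_cast at hW ⊢; omega
      rw [show ((n + 1 : Nat) : Int) = (n : Int) + 1 by push_cast; ring,
        PySem.List.pyRange_one_succ_right (by positivity)]
      rw [List.foldl_append, ih h1 h2]
      have hne : ¬ ((n : Int) == 0) = true := by simp; omega
      have hlt : (n : Int) < width - 1 := by push_cast at hW; omega
      simp only [List.foldl_cons, List.foldl_nil, pvStepA, hne, hlt, if_pos,
        Bool.false_eq_true, if_false]
      rw [show n + 1 - 1 = (n - 1) + 1 from by omega, List.replicate_succ', List.cons_append]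

-- the whole loop, as a function of the fixed width and the letter
lemma pvLoopA_closed (width : Int) (c : Char) :
    (PySem.List.pyRange 0 width 1).foldl (pvStepA width c) [] =
      (if width ≤ 0 then []
       else if width = 1 then [' ']
       else ' ' :: (List.replicate (width - 2).toNat c ++ [' '])) := by
  by_cases h0 : width ≤ 0
  · rw [PySem.List.pyRange_one_eq_nil h0]; simp [h0]
  · by_cases h1 : width = 1
    · subst h1
      have h01 : PySem.List.pyRange 0 1 1 = [0] := by decide
      rw [h01]; simp [pvStepA]
    · have h2 : 2 ≤ width := by omega
      obtain ⟨m, hm⟩ : ∃ m : Nat, width = (m : Int) + 1 := ⟨(width - 1).toNat, by omega⟩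
      have hm1 : 1 ≤ m := by omega
      rw [hm, PySem.List.pyRange_one_succ_right (by positivity), List.foldl_append,
        pvLoopA_partial _ c m hm1 (by omega)]
      have hne : ¬ ((m : Int) == 0) = true := by simp; omega
      have hnl : ¬ ((m : Int) < (m : Int) + 1 - 1) := by omega
      have heq : ((m : Int) == (m : Int) + 1 - 1) = true := by simp
      simp only [List.foldl_cons, List.foldl_nil, pvStepA, hne, Bool.false_eq_true,
        hnl, if_neg, heq, if_pos, not_false_eq_true]
      rw [if_neg (by omega : ¬ ((m : Int) + 1 ≤ 0)), if_neg (by omega : ¬ ((m : Int) + 1 = 1))]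
      have h2' : ((m : Int) + 1 - 2).toNat = m - 1 := by omega
      simp [h2']

-- ===== VERDICT (by name: the statement is the Claim_ definition above) =====
theorem add_top_bottom_element_spec : Claim_equal_add_top_bottom_element := by
  intro width j _
  unfold Spec_add_top_bottom_element add_top_bottom_element add_top_bottom_element_alt
  by_cases hj : (j == 0) = true <;>
    simp only [hj, if_pos, Bool.false_eq_true, if_neg, pvLoopA_closed, not_false_eq_true] <;>
    split_ifs <;> rfl
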